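-- pv_equiv track=rewrite | github.com/jasper-hyj/polymorphic-hardware-accelerators | src/string_algorithms.py | extract_uncovered
-- ===== SOURCE A (Python) =====
-- from typing import Dict, List, Optional, Set, Tuple
--
-- TOKEN_SEP = "\u2192"          # → separator used in diagram strings
--
-- def extract_uncovered(tokens: List[str], covered: Set[int]) -> List[str]:
--     """Extract contiguous runs of tokens not in the *covered* index set."""
--     runs: List[str] = []
--     current: List[str] = []
--     for i, tok in enumerate(tokens):
--         if i not in covered:
--             current.append(tok)
--         else:
--             if current:
--                 runs.append(TOKEN_SEP.join(current))
--                 current = []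
--     if current:
--         runs.append(TOKEN_SEP.join(current))
--     return runs
-- ===== SOURCE B (Python) =====
-- from itertools import groupby
-- from typing import List, Set
--
-- TOKEN_SEP = "\u2192"
--
-- def extract_uncovered(tokens: List[str], covered: Set[int]) -> List[str]:
--     """Extract contiguous runs of tokens not in the *covered* index set."""
--     groups = groupby(enumerate(tokens), key=lambda it: it[0] in covered)
--     return [TOKEN_SEP.join(tok for _, tok in grp)
--             for is_cov, grp in groups if not is_cov]
-- ===== Notes on version B (the rewrite author's own statement) =====
-- stated objective: idiomatic
-- what changed: Replaced the accumulate-and-flush state machine (with its trailing-flush special case) by an itertools.groupby segmentation of the enumerated tokens into maximal same-membership runs, followed by a filter/join comprehension.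
import Mathlib
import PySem

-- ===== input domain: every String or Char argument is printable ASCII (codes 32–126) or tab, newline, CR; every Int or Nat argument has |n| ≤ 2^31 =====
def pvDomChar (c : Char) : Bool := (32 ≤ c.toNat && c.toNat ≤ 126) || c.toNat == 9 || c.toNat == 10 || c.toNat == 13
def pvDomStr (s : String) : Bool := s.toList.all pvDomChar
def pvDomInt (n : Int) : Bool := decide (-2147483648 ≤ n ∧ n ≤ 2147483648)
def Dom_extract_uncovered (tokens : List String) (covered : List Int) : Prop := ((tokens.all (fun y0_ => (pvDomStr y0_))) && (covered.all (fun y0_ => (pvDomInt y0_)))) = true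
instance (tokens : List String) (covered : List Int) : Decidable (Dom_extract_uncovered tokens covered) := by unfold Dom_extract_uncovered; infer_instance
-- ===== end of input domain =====

-- B re-implements the accumulate-and-flush loop as groupby-style segmentation then filter/map
-- (idiomatic decomposition, same O(n·|covered|) cost); return value only, no mutation involved.

-- ===== PORT A =====
-- state machine: (runs, current); flush current on a covered index, final flush at the end
def extract_uncovered (tokens : List String) (covered : List Int) : List String :=
  let st := (PySem.List.enumerate tokens).foldl
    (fun (st : List String × List String) p =>
      if ¬ (covered.contains p.1) then (st.1, st.2 ++ [p.2])
      else if st.2 ≠ [] then (st.1 ++ [PySem.Str.join "→" st.2], [])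
      else (st.1, []))
    ([], [])
  if st.2 ≠ [] then st.1 ++ [PySem.Str.join "→" st.2] else st.1

-- ===== PORT B =====
-- itertools.groupby: split the enumerated stream into maximal same-membership segments
def pvGroups (covered : List Int) : List (Int × String) → List (Bool × List String)
  | [] => []
  | (i, t) :: rest =>
    let k := covered.contains i
    let s := rest.span (fun p => covered.contains p.1 == k)
    (k, t :: s.1.map Prod.snd) :: pvGroups covered s.2
termination_by l => l.length
decreasing_by
  simp only [List.span_eq_takeWhile_dropWhile, List.length_cons]
  exact Nat.lt_succ_of_le (List.length_dropWhile_le _ _)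

-- keep only the uncovered groups, joining each with the separator
def extract_uncovered_alt (tokens : List String) (covered : List Int) : List String :=
  ((pvGroups covered (PySem.List.enumerate tokens)).filter (fun g => !g.1)).map
    (fun g => PySem.Str.join "→" g.2)

-- ===== PRECONDITION & SPEC =====
def Spec_extract_uncovered (tokens : List String) (covered : List Int) (out : List String) : Prop := out = extract_uncovered_alt tokens covered
instance (tokens : List String) (covered : List Int) (out : List String) : Decidable (Spec_extract_uncovered tokens covered out) := by unfold Spec_extract_uncovered; infer_instance

-- ===== CLAIM (what is proved, stated in full; the proofs are below) =====
def Claim_equal_extract_uncovered : Prop := ∀ (tokens : List String) (covered : List Int), Dom_extract_uncovered tokens covered → Spec_extract_uncovered tokens covered (extract_uncovered tokens covered)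

-- ===== LEMMAS AND PROOFS =====

-- recursive characterisation of A's loop (proof-only helper)
def pvR (covered : List Int) : List String → List (Int × String) → List String
  | cur, [] => if cur ≠ [] then [PySem.Str.join "→" cur] else []
  | cur, (i, t) :: rest =>
    if ¬ (covered.contains i) then pvR covered (cur ++ [t]) rest
    else (if cur ≠ [] then [PySem.Str.join "→" cur] else []) ++ pvR covered [] rest

theorem pvA_loop (covered : List Int) (l : List (Int × String)) :
    ∀ (runs cur : List String),
    (let st := l.foldl
        (fun (st : List String × List String) p =>
          if ¬ (covered.contains p.1) then (st.1, st.2 ++ [p.2])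
          else if st.2 ≠ [] then (st.1 ++ [PySem.Str.join "→" st.2], [])
          else (st.1, []))
        (runs, cur)
     if st.2 ≠ [] then st.1 ++ [PySem.Str.join "→" st.2] else st.1)
      = runs ++ pvR covered cur l := by
  induction l with
  | nil =>
    intro runs cur
    simp only [List.foldl_nil, pvR]
    split_ifs <;> simp
  | cons p rest ih =>
    intro runs cur
    obtain ⟨i, t⟩ := p
    simp only [List.foldl_cons]
    by_cases h : covered.contains i = true
    · have hmem : i ∈ covered := by simpa using h
      rw [if_neg (not_not_intro h)]
      by_cases hc : cur = []
      · rw [if_neg (not_not_intro hc), ih]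
        simp [pvR, hmem, hc]
      · rw [if_pos hc, ih]
        simp [pvR, hmem, hc]
    · have hmem : i ∉ covered := by simpa using h
      rw [if_pos h, ih]
      simp [pvR, hmem]

theorem pvR_skip_covered (covered : List Int) (grp : List (Int × String))
    (h : ∀ p ∈ grp, covered.contains p.1 = true) (rest : List (Int × String)) :
    pvR covered [] (grp ++ rest) = pvR covered [] rest := by
  induction grp with
  | nil => rfl
  | cons q grp ih =>
    obtain ⟨i, t⟩ := q
    have hq : covered.contains i = true := h (i, t) (List.mem_cons_self)
    simp only [List.cons_append, pvR, hq, not_true_eq_false, if_false]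
    simp [ih (fun p hp => h p (List.mem_cons_of_mem _ hp))]

theorem pvR_take_uncovered (covered : List Int) (grp : List (Int × String))
    (h : ∀ p ∈ grp, covered.contains p.1 = false) :
    ∀ (cur : List String) (rest : List (Int × String)),
    pvR covered cur (grp ++ rest) = pvR covered (cur ++ grp.map Prod.snd) rest := by
  induction grp with
  | nil => intro cur rest; simp
  | cons q grp ih =>
    intro cur rest
    obtain ⟨i, t⟩ := q
    have hq : covered.contains i = false := h (i, t) (List.mem_cons_self)
    simp only [List.cons_append, pvR, hq, not_false_eq_true, if_true, Bool.false_eq_true]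
    rw [ih (fun p hp => h p (List.mem_cons_of_mem _ hp))]
    simp

theorem pvDropWhile_shape {α : Type} (p : α → Bool) (l : List α) :
    l.dropWhile p = [] ∨ ∃ q r, l.dropWhile p = q :: r ∧ p q = false := by
  induction l with
  | nil => exact Or.inl rfl
  | cons x xs ih =>
    by_cases hx : p x
    · simpa [List.dropWhile, hx] using ih
    · exact Or.inr ⟨x, xs, by simp [List.dropWhile, hx], by simpa using hx⟩

theorem pvR_flush (covered : List Int) (cur : List String) (l : List (Int × String))
    (h : l = [] ∨ ∃ q r, l = q :: r ∧ covered.contains q.1 = true) :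
    pvR covered cur l = (if cur ≠ [] then [PySem.Str.join "→" cur] else []) ++ pvR covered [] l := by
  rcases h with h | ⟨q, r, rfl, hq⟩
  · subst h; simp [pvR]
  · obtain ⟨i, t⟩ := q
    have hmem : i ∈ covered := by simpa using hq
    simp [pvR, hmem]

theorem pvR_eq_groups (covered : List Int) (l : List (Int × String)) :
    pvR covered [] l =
      ((pvGroups covered l).filter (fun g => !g.1)).map (fun g => PySem.Str.join "→" g.2) := by
  fun_induction pvGroups covered l with
  | case1 => rfl
  | case2 i t rest k s ih =>
    have hs : s = (rest.takeWhile (fun p => covered.contains p.1 == k),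
                   rest.dropWhile (fun p => covered.contains p.1 == k)) := by
      exact List.span_eq_takeWhile_dropWhile _ _
    have hrest : rest = s.1 ++ s.2 := by rw [hs]; simp
    by_cases hk : covered.contains i = true
    · -- covered group: filtered out on both sides
      have hk' : k = true := hk
      have hall : ∀ p ∈ s.1, covered.contains p.1 = true := by
        intro p hp
        rw [hs] at hp
        have := List.mem_takeWhile_imp hp
        simpa [hk'] using this
      simp only [pvR, hk, not_true_eq_false, if_false, List.nil_append]
      rw [hrest, pvR_skip_covered covered s.1 hall s.2, ih]
      simp [hk']
    · -- uncovered group: it heads both sides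
      have hk' : k = false := by
        simp only [Bool.not_eq_true] at hk; exact hk
      have hkf : covered.contains i = false := by simpa using hk
      have hall : ∀ p ∈ s.1, covered.contains p.1 = false := by
        intro p hp
        rw [hs] at hp
        have := List.mem_takeWhile_imp hp
        simpa [hk'] using this
      have hdrop : s.2 = [] ∨ ∃ q r, s.2 = q :: r ∧ covered.contains q.1 = true := by
        rw [hs]
        rcases pvDropWhile_shape (fun p => covered.contains p.1 == k) rest with h | ⟨q, r, hqr, hq⟩
        · exact Or.inl h
        · exact Or.inr ⟨q, r, hqr, by simpa [hk'] using hq⟩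
      simp only [pvR, hkf, Bool.false_eq_true, not_false_eq_true, if_true, List.nil_append]
      rw [hrest, pvR_take_uncovered covered s.1 hall [t] s.2,
          pvR_flush covered _ s.2 hdrop, ih]
      simp [hk']

-- ===== VERDICT (by name: the statement is the Claim_ definition above) =====
theorem extract_uncovered_spec : Claim_equal_extract_uncovered := by
  intro tokens covered _
  show _ = _
  unfold extract_uncovered extract_uncovered_alt
  rw [pvA_loop covered (PySem.List.enumerate tokens) [] [], pvR_eq_groups]
  simp
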